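-- pv_equiv track=rewrite | github.com/higorsmonteiro/fluxsus | fluxsus/fluxnets/fnets_utils.py | filter_chapter
-- ===== SOURCE A (Python) =====
-- from collections import defaultdict
--
-- def filter_chapter(chapter: str):
--     '''
--         Gives a list of ICD-10 codes (up to the 3rd character) corresponding to
--         the parsed ICD-10 chapter.
--
--         Args:
--         -----
--             chapter:
--                 String. Roman number referring to a ICD-10 chapter.
--
--         Return:
--         -------
--             List.
--
--     '''
--     cid10_chapters = defaultdict(lambda: [])
--
--     # -- certain infectious and parasitic diseases
--     cid10_chapters['I'] = [ 'A'+f'{n:2.0f}'.replace(' ', '0') for n in range(0, 99+1) ]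
--     cid10_chapters['I'] += [ 'B'+f'{n:2.0f}'.replace(' ', '0') for n in range(0, 99+1) ]
--     # -- neoplasms
--     cid10_chapters['II'] = [ 'C'+f'{n:2.0f}'.replace(' ', '0') for n in range(0, 99+1) ]
--     cid10_chapters['II'] += [ 'D'+f'{n:2.0f}'.replace(' ', '0') for n in range(0, 48+1) ]
--     # -- diseases of the blood and blood-forming organs and certain disorders involving the immune mechanism
--     cid10_chapters['III'] = [ 'D'+f'{n:2.0f}'.replace(' ', '0') for n in range(50, 89+1) ]
--     # -- endocrine, nutritional and metabolic diseases
--     cid10_chapters['IV'] = [ 'E'+f'{n:2.0f}'.replace(' ', '0') for n in range(0, 90+1) ]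
--     # -- mental and behavioural disorders
--     cid10_chapters['V'] = [ 'F'+f'{n:2.0f}'.replace(' ', '0') for n in range(0, 99+1) ]
--     # -- diseases of the nervous system
--     cid10_chapters['VI'] = [ 'G'+f'{n:2.0f}'.replace(' ', '0') for n in range(0, 99+1) ]
--     # -- diseases of the eye and adnexa
--     cid10_chapters['VII'] = [ 'H'+f'{n:2.0f}'.replace(' ', '0') for n in range(0, 59+1) ]
--     # -- diseases of the ear and mastoid process
--     cid10_chapters['VIII'] = [ 'H'+f'{n:2.0f}'.replace(' ', '0') for n in range(60, 95+1) ]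
--     # -- diseases of the circulatory system
--     cid10_chapters['IX'] = [ 'I'+f'{n:2.0f}'.replace(' ', '0') for n in range(0, 99+1) ]
--     # -- diseases of the respiratory system
--     cid10_chapters['X'] = [ 'J'+f'{n:2.0f}'.replace(' ', '0') for n in range(0, 99+1) ]
--     # -- diseases of the digestive system
--     cid10_chapters['XI'] = [ 'K'+f'{n:2.0f}'.replace(' ', '0') for n in range(0, 93+1) ]
--     # -- diseases of the skin and subcutaneous tissue
--     cid10_chapters['XII'] = [ 'L'+f'{n:2.0f}'.replace(' ', '0') for n in range(0, 99+1) ]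
--     # -- diseases of the musculoskeletal system and connective tissue
--     cid10_chapters['XIII'] = [ 'M'+f'{n:2.0f}'.replace(' ', '0') for n in range(0, 99+1) ]
--     # -- diseases of the genitourinary system
--     cid10_chapters['XIV'] = [ 'N'+f'{n:2.0f}'.replace(' ', '0') for n in range(0, 99+1) ]
--     # -- pregnancy, childbirth and the puerperium
--     cid10_chapters['XV'] = [ 'O'+f'{n:2.0f}'.replace(' ', '0') for n in range(0, 99+1) ]
--     # -- certain conditions originating in the perinatal period
--     cid10_chapters['XVI'] = [ 'P'+f'{n:2.0f}'.replace(' ', '0') for n in range(0, 96+1) ]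
--     # -- congenital malformations, deformations and chromosomal abnormalities
--     cid10_chapters['XVII'] = [ 'Q'+f'{n:2.0f}'.replace(' ', '0') for n in range(0, 99+1) ]
--     # -- Symptoms, signs and abnormal clinical and laboratory findings, not elsewhere classified
--     cid10_chapters['XVIII'] = [ 'R'+f'{n:2.0f}'.replace(' ', '0') for n in range(0, 99+1) ]
--     # -- injury, poisoning and certain other consequences of external causes
--     cid10_chapters['XIX'] = [ 'S'+f'{n:2.0f}'.replace(' ', '0') for n in range(0, 99+1) ]
--     cid10_chapters['XIX'] += [ 'T'+f'{n:2.0f}'.replace(' ', '0') for n in range(0, 98+1) ]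
--     # -- external causes of morbidity and mortality
--     cid10_chapters['XX'] = [ 'V'+f'{n:2.0f}'.replace(' ', '0') for n in range(1, 99+1) ]
--     cid10_chapters['XX'] += [ 'Y'+f'{n:2.0f}'.replace(' ', '0') for n in range(0, 98+1) ]
--     # -- factors influencing health status and contact with health services
--     cid10_chapters['XXI'] = [ 'Z'+f'{n:2.0f}'.replace(' ', '0') for n in range(0, 99+1) ]
--     # -- factors influencing health status and contact with health services
--     cid10_chapters['XXII'] = [ 'U'+f'{n:2.0f}'.replace(' ', '0') for n in range(0, 99+1) ]
--
--     if chapter not in cid10_chapters.keys():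
--         raise Exception('Chapter not included in the list.')
--
--     return cid10_chapters[chapter]
-- ===== SOURCE B (Python) =====
-- # B: one data table (letter, start, stop) per chapter; builds only the requested chapter.
-- _SPECS = {
--     'I':    [('A', 0, 99), ('B', 0, 99)],
--     'II':   [('C', 0, 99), ('D', 0, 48)],
--     'III':  [('D', 50, 89)],
--     'IV':   [('E', 0, 90)],
--     'V':    [('F', 0, 99)],
--     'VI':   [('G', 0, 99)],
--     'VII':  [('H', 0, 59)],
--     'VIII': [('H', 60, 95)],
--     'IX':   [('I', 0, 99)],
--     'X':    [('J', 0, 99)],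
--     'XI':   [('K', 0, 93)],
--     'XII':  [('L', 0, 99)],
--     'XIII': [('M', 0, 99)],
--     'XIV':  [('N', 0, 99)],
--     'XV':   [('O', 0, 99)],
--     'XVI':  [('P', 0, 96)],
--     'XVII': [('Q', 0, 99)],
--     'XVIII':[('R', 0, 99)],
--     'XIX':  [('S', 0, 99), ('T', 0, 98)],
--     'XX':   [('V', 1, 99), ('Y', 0, 98)],
--     'XXI':  [('Z', 0, 99)],
--     'XXII': [('U', 0, 99)],
-- }
--
-- def filter_chapter(chapter: str):
--     if chapter not in _SPECS:
--         raise Exception('Chapter not included in the list.')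
--     out = []
--     for letter, start, stop in _SPECS[chapter]:
--         for n in range(start, stop + 1):
--             out.append(letter + str(n).zfill(2))
--     return out
-- ===== Notes on version B (the rewrite author's own statement) =====
-- stated objective: simpler
-- what changed: Replaces the 22 hand-written list-comprehension blocks that build every chapter's list into a dict with a single (letter, start, stop) data table and one nested loop that builds only the requested chapter.
import Mathlib
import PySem

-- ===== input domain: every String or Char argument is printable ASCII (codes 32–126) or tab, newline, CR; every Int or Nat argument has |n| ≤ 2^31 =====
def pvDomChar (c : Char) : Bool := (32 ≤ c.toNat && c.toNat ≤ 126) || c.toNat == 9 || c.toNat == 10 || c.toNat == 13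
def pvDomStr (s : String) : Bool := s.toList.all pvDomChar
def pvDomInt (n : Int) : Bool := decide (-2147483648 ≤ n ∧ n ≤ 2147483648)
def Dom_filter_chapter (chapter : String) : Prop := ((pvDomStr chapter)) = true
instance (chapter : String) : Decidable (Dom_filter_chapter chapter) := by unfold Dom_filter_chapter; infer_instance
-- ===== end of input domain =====

-- B replaces A's 22 hand-written per-chapter list blocks by one (letter, start, stop) data table
-- and a single nested loop that builds only the requested chapter (objective: simpler).

-- ===== PORT A =====
-- f'{n:2.0f}'.replace(' ', '0'): width-2 space-padded integer rendering then ' '→'0';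
-- ported by hand (no PySem float formatting); exact for the 0 ≤ n ≤ 99 values A ever formats.
def pvFmtA (n : Int) : String :=
  let s := PySem.Int.toStr n
  let s := if PySem.Str.len s < 2 then " " ++ s else s
  PySem.Str.replace s " " "0"

-- [ letter + f'{n:2.0f}'.replace(' ','0') for n in range(a, b) ]
def pvCompA (letter : String) (a b : Int) : List String :=
  (PySem.List.pyRange a b 1).map (fun n => letter ++ pvFmtA n)

def filter_chapter (chapter : String) : List String :=
  let d : PySem.Dict String (List String) := PySem.Dict.empty
  let d := d.insert "I" (pvCompA "A" 0 (99+1))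
  let d := d.insert "I" (d.getD "I" [] ++ pvCompA "B" 0 (99+1))
  let d := d.insert "II" (pvCompA "C" 0 (99+1))
  let d := d.insert "II" (d.getD "II" [] ++ pvCompA "D" 0 (48+1))
  let d := d.insert "III" (pvCompA "D" 50 (89+1))
  let d := d.insert "IV" (pvCompA "E" 0 (90+1))
  let d := d.insert "V" (pvCompA "F" 0 (99+1))
  let d := d.insert "VI" (pvCompA "G" 0 (99+1))
  let d := d.insert "VII" (pvCompA "H" 0 (59+1))
  let d := d.insert "VIII" (pvCompA "H" 60 (95+1))
  let d := d.insert "IX" (pvCompA "I" 0 (99+1))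
  let d := d.insert "X" (pvCompA "J" 0 (99+1))
  let d := d.insert "XI" (pvCompA "K" 0 (93+1))
  let d := d.insert "XII" (pvCompA "L" 0 (99+1))
  let d := d.insert "XIII" (pvCompA "M" 0 (99+1))
  let d := d.insert "XIV" (pvCompA "N" 0 (99+1))
  let d := d.insert "XV" (pvCompA "O" 0 (99+1))
  let d := d.insert "XVI" (pvCompA "P" 0 (96+1))
  let d := d.insert "XVII" (pvCompA "Q" 0 (99+1))
  let d := d.insert "XVIII" (pvCompA "R" 0 (99+1))
  let d := d.insert "XIX" (pvCompA "S" 0 (99+1))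
  let d := d.insert "XIX" (d.getD "XIX" [] ++ pvCompA "T" 0 (98+1))
  let d := d.insert "XX" (pvCompA "V" 1 (99+1))
  let d := d.insert "XX" (d.getD "XX" [] ++ pvCompA "Y" 0 (98+1))
  let d := d.insert "XXI" (pvCompA "Z" 0 (99+1))
  let d := d.insert "XXII" (pvCompA "U" 0 (99+1))
  if d.contains chapter then d.getD chapter []
  else []  -- Python raises Exception('Chapter not included in the list.') here; outside Pre_

-- ===== PORT B =====
-- str(n).zfill(2)
def pvZ2 (n : Int) : String :=
  let s := PySem.Int.toStr n
  if PySem.Str.len s < 2 then "0" ++ s else s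

-- the _SPECS table of Source B
def pvSpecsB : PySem.Dict String (List (String × Int × Int)) := PySem.Dict.ofList [
  ("I", [("A", (0 : Int), (99 : Int)), ("B", (0 : Int), (99 : Int))]),
  ("II", [("C", (0 : Int), (99 : Int)), ("D", (0 : Int), (48 : Int))]),
  ("III", [("D", (50 : Int), (89 : Int))]),
  ("IV", [("E", (0 : Int), (90 : Int))]),
  ("V", [("F", (0 : Int), (99 : Int))]),
  ("VI", [("G", (0 : Int), (99 : Int))]),
  ("VII", [("H", (0 : Int), (59 : Int))]),
  ("VIII", [("H", (60 : Int), (95 : Int))]),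
  ("IX", [("I", (0 : Int), (99 : Int))]),
  ("X", [("J", (0 : Int), (99 : Int))]),
  ("XI", [("K", (0 : Int), (93 : Int))]),
  ("XII", [("L", (0 : Int), (99 : Int))]),
  ("XIII", [("M", (0 : Int), (99 : Int))]),
  ("XIV", [("N", (0 : Int), (99 : Int))]),
  ("XV", [("O", (0 : Int), (99 : Int))]),
  ("XVI", [("P", (0 : Int), (96 : Int))]),
  ("XVII", [("Q", (0 : Int), (99 : Int))]),
  ("XVIII", [("R", (0 : Int), (99 : Int))]),
  ("XIX", [("S", (0 : Int), (99 : Int)), ("T", (0 : Int), (98 : Int))]),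
  ("XX", [("V", (1 : Int), (99 : Int)), ("Y", (0 : Int), (98 : Int))]),
  ("XXI", [("Z", (0 : Int), (99 : Int))]),
  ("XXII", [("U", (0 : Int), (99 : Int))])]

def filter_chapter_alt (chapter : String) : List String :=
  match pvSpecsB.get? chapter with
  | none => []  -- Python raises Exception('Chapter not included in the list.') here; outside Pre_
  | some specs =>
    specs.foldl (fun out spec =>
      out ++ (PySem.List.pyRange spec.2.1 (spec.2.2 + 1) 1).map (fun n => spec.1 ++ pvZ2 n)) []

-- ===== PRECONDITION & SPEC =====
-- A raises Exception('Chapter not included in the list.') for any string that is not one of the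
-- 22 Roman-numeral chapter keys; Pre_ admits exactly the 22 keys A returns on.
def Pre_filter_chapter (chapter : String) : Prop :=
  chapter ∈ ["I", "II", "III", "IV", "V", "VI", "VII", "VIII", "IX", "X", "XI", "XII", "XIII", "XIV", "XV", "XVI", "XVII", "XVIII", "XIX", "XX", "XXI", "XXII"]
instance (chapter : String) : Decidable (Pre_filter_chapter chapter) := by unfold Pre_filter_chapter; infer_instance

def pvWitness_filter_chapter : String := "III"

def Spec_filter_chapter (chapter : String) (out : List String) : Prop := out = filter_chapter_alt chapter
instance (chapter : String) (out : List String) : Decidable (Spec_filter_chapter chapter out) := by unfold Spec_filter_chapter; infer_instance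

-- ===== CLAIM (what is proved, stated in full; the proofs are below) =====
def Claim_equal_filter_chapter : Prop := ∀ (chapter : String), Dom_filter_chapter chapter → Pre_filter_chapter chapter → Spec_filter_chapter chapter (filter_chapter chapter)

-- ===== LEMMAS AND PROOFS =====

-- ===== VERDICT (by name: the statement is the Claim_ definition above) =====
set_option maxRecDepth 8000 in
set_option maxHeartbeats 2000000 in
theorem filter_chapter_spec : Claim_equal_filter_chapter := by
  intro chapter _ hpre
  unfold Pre_filter_chapter at hpre
  unfold Spec_filter_chapter
  fin_cases hpre <;> decide
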